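-- pv_equiv track=rewrite | github.com/fatiiMAA17/ForLesson | balancedSums.py | balancedSums
-- ===== SOURCE A (Python) =====
-- def balancedSums(arr):
--     total = sum(arr)
--     left_sum = 0
--
--     for num in arr:
--         if left_sum == total - left_sum - num:
--             return "YES"
--         left_sum += num
--
--     return "NO"
-- ===== SOURCE B (Python) =====
-- def balancedSums(arr):
--     for i in range(len(arr)):
--         if sum(arr[:i]) == sum(arr[i+1:]):
--             return "YES"
--     return "NO"
-- ===== Notes on version B (the rewrite author's own statement) =====
-- stated objective: simpler
-- what changed: Replaced A's single running-sum pass over elements with a per-index loop that re-sums the left slice arr[:i] and right slice arr[i+1:] directly each iteration.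
import Mathlib
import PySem

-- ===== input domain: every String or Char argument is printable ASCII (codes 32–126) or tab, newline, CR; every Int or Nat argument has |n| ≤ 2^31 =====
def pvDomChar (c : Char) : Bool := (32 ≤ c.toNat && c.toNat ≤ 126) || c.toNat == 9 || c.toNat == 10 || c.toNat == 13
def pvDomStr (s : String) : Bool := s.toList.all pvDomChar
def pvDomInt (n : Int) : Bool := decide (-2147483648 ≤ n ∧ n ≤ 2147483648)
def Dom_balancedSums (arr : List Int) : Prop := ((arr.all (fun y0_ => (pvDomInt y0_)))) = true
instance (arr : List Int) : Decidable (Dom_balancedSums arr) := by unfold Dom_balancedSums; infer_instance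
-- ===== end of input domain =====

-- B replaces A's single running-sum pass with a per-index loop re-summing arr[:i] and arr[i+1:]; objective: simpler.


-- ===== PORT A =====
-- the for-loop with running left_sum, literal
def pvGoA (total : Int) : List Int → Int → String
  | [], _ => "NO"
  | n :: t, ls => if ls = total - ls - n then "YES" else pvGoA total t (ls + n)

def balancedSums (arr : List Int) : String :=
  pvGoA arr.sum arr 0

-- ===== PORT B =====
-- the index loop of Source B; slices arr[:i] and arr[i+1:] have nonnegative bounds, so take/drop are exact
def pvGoB (arr : List Int) : List Nat → String
  | [] => "NO"
  | i :: t => if (arr.take i).sum = (arr.drop (i + 1)).sum then "YES" else pvGoB arr t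

def balancedSums_alt (arr : List Int) : String :=
  pvGoB arr (List.range arr.length)

-- ===== PRECONDITION & SPEC =====
def Spec_balancedSums (arr : List Int) (out : String) : Prop := out = balancedSums_alt arr
instance (arr : List Int) (out : String) : Decidable (Spec_balancedSums arr out) := by unfold Spec_balancedSums; infer_instance

-- ===== CLAIM (what is proved, stated in full; the proofs are below) =====
def Claim_equal_balancedSums : Prop := ∀ (arr : List Int), Dom_balancedSums arr → Spec_balancedSums arr (balancedSums arr)

-- ===== LEMMAS AND PROOFS =====
theorem pvGo_eq (pre rest : List Int) :
    pvGoB (pre ++ rest) (List.range' pre.length rest.length) =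
      pvGoA (pre ++ rest).sum rest pre.sum := by
  induction rest generalizing pre with
  | nil => simp [pvGoB, pvGoA]
  | cons n t ih =>
    simp only [List.length_cons, List.range'_succ, pvGoB, pvGoA]
    have htake : (pre ++ n :: t).take pre.length = pre := by
      simp
    have hdrop : (pre ++ n :: t).drop (pre.length + 1) = t := by
      rw [show pre.length + 1 = (pre ++ [n]).length by simp]
      rw [show pre ++ n :: t = (pre ++ [n]) ++ t by simp]
      simp
    have hcond : ((pre ++ n :: t).take pre.length).sum = ((pre ++ n :: t).drop (pre.length + 1)).sum
        ↔ pre.sum = (pre ++ n :: t).sum - pre.sum - n := by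
      rw [htake, hdrop]; simp [List.sum_append]
    by_cases h : pre.sum = (pre ++ n :: t).sum - pre.sum - n
    · rw [if_pos (hcond.mpr h), if_pos h]
    · rw [if_neg (fun hc => h (hcond.mp hc)), if_neg h]
      have := ih (pre ++ [n])
      simpa [List.sum_append] using this

-- ===== VERDICT (by name: the statement is the Claim_ definition above) =====
theorem balancedSums_spec : Claim_equal_balancedSums := by
  intro arr _
  unfold Spec_balancedSums balancedSums balancedSums_alt
  have := pvGo_eq [] arr
  simpa [List.range_eq_range'] using this.symm
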